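-- pv_equiv track=rewrite | github.com/AjayvirS/PRahari | app/reviewer.py | _derive_questions
-- ===== SOURCE A (Python) =====
-- def _derive_questions(changed_files: list[str]) -> list[str]:
--     questions: list[str] = []
--
--     if any(
--         token in filename.lower()
--         for filename in changed_files
--         for token in ("worker", "queue", "review")
--     ):
--         questions.append("Should retry behavior or stale-job handling change for this path?")
--
--     if any(
--         token in filename.lower()
--         for filename in changed_files
--         for token in ("migration", ".sql", "database")
--     ):
--         questions.append("Does this schema change require deployment ordering or backfill steps?")
--
--     if any(
--         token in filename.lower()
--         for filename in changed_files
--         for token in ("config", ".env", "docker")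
--     ):
--         questions.append("Are there operator-facing configuration updates that should be documented?")
--
--     return questions[:3]
-- ===== SOURCE B (Python) =====
-- def _derive_questions(changed_files: list[str]) -> list[str]:
--     worker = schema = config = False
--     for filename in changed_files:
--         low = filename.lower()
--         worker = worker or "worker" in low or "queue" in low or "review" in low
--         schema = schema or "migration" in low or ".sql" in low or "database" in low
--         config = config or "config" in low or ".env" in low or "docker" in low
--     questions: list[str] = []
--     if worker:
--         questions.append("Should retry behavior or stale-job handling change for this path?")
--     if schema:
--         questions.append("Does this schema change require deployment ordering or backfill steps?")
--     if config:
--         questions.append("Are there operator-facing configuration updates that should be documented?")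
--     return questions
-- ===== Notes on version B (the rewrite author's own statement) =====
-- stated objective: faster
-- what changed: One pass over the files accumulating three boolean flags (lowercasing each filename once), then emitting the questions afterward, instead of three independent any-generator scans that each re-lowercase every filename, plus a slice.
import Mathlib
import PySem

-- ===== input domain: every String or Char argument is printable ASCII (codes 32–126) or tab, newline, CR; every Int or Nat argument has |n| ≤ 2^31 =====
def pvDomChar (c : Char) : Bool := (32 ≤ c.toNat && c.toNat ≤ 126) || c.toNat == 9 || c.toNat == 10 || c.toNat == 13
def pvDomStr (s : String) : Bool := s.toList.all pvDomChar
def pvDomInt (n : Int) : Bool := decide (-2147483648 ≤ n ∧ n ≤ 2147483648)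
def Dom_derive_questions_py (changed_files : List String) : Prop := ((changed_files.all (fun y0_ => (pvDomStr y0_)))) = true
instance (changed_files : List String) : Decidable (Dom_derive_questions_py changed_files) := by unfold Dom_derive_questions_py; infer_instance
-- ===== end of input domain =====

-- B replaces A's three independent any-scans (plus a [:3] slice) by a single pass accumulating
-- three boolean flags, lowercasing each filename once, then emitting the questions (objective: simpler).


-- ===== PORT A =====
def derive_questions_py (changed_files : List String) : List String :=
  let questions : List String := []
  let questions :=
    if changed_files.any (fun filename =>
        ["worker", "queue", "review"].any (fun token => PySem.Str.isIn token (PySem.Str.lower filename)))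
    then questions ++ ["Should retry behavior or stale-job handling change for this path?"] else questions
  let questions :=
    if changed_files.any (fun filename =>
        ["migration", ".sql", "database"].any (fun token => PySem.Str.isIn token (PySem.Str.lower filename)))
    then questions ++ ["Does this schema change require deployment ordering or backfill steps?"] else questions
  let questions :=
    if changed_files.any (fun filename =>
        ["config", ".env", "docker"].any (fun token => PySem.Str.isIn token (PySem.Str.lower filename)))
    then questions ++ ["Are there operator-facing configuration updates that should be documented?"] else questions
  PySem.List.slice questions none (some 3)

-- ===== PORT B =====
def derive_questions_py_alt (changed_files : List String) : List String :=
  let flags :=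
    changed_files.foldl (fun (acc : Bool × Bool × Bool) filename =>
      let low := PySem.Str.lower filename
      (acc.1 || PySem.Str.isIn "worker" low || PySem.Str.isIn "queue" low || PySem.Str.isIn "review" low,
       acc.2.1 || PySem.Str.isIn "migration" low || PySem.Str.isIn ".sql" low || PySem.Str.isIn "database" low,
       acc.2.2 || PySem.Str.isIn "config" low || PySem.Str.isIn ".env" low || PySem.Str.isIn "docker" low))
      (false, false, false)
  (if flags.1 then ["Should retry behavior or stale-job handling change for this path?"] else []) ++
  (if flags.2.1 then ["Does this schema change require deployment ordering or backfill steps?"] else []) ++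
  (if flags.2.2 then ["Are there operator-facing configuration updates that should be documented?"] else [])

-- ===== PRECONDITION & SPEC =====
def Spec_derive_questions_py (changed_files : List String) (out : List String) : Prop := out = derive_questions_py_alt changed_files
instance (changed_files : List String) (out : List String) : Decidable (Spec_derive_questions_py changed_files out) := by unfold Spec_derive_questions_py; infer_instance

-- ===== CLAIM (what is proved, stated in full; the proofs are below) =====
def Claim_equal_derive_questions_py : Prop := ∀ (changed_files : List String), Dom_derive_questions_py changed_files → Spec_derive_questions_py changed_files (derive_questions_py changed_files)

-- ===== LEMMAS AND PROOFS =====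
lemma fold_flags_eq (cf : List String) (a b c : Bool) :
    cf.foldl (fun (acc : Bool × Bool × Bool) filename =>
      let low := PySem.Str.lower filename
      (acc.1 || PySem.Str.isIn "worker" low || PySem.Str.isIn "queue" low || PySem.Str.isIn "review" low,
       acc.2.1 || PySem.Str.isIn "migration" low || PySem.Str.isIn ".sql" low || PySem.Str.isIn "database" low,
       acc.2.2 || PySem.Str.isIn "config" low || PySem.Str.isIn ".env" low || PySem.Str.isIn "docker" low))
      (a, b, c)
    = (a || cf.any (fun f => PySem.Str.isIn "worker" (PySem.Str.lower f) || (PySem.Str.isIn "queue" (PySem.Str.lower f) || PySem.Str.isIn "review" (PySem.Str.lower f))),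
       b || cf.any (fun f => PySem.Str.isIn "migration" (PySem.Str.lower f) || (PySem.Str.isIn ".sql" (PySem.Str.lower f) || PySem.Str.isIn "database" (PySem.Str.lower f))),
       c || cf.any (fun f => PySem.Str.isIn "config" (PySem.Str.lower f) || (PySem.Str.isIn ".env" (PySem.Str.lower f) || PySem.Str.isIn "docker" (PySem.Str.lower f)))) := by
  induction cf generalizing a b c with
  | nil => simp
  | cons hd tl ih =>
      simp only [List.foldl_cons]
      rw [ih]
      simp [List.any_cons, Bool.or_assoc]

-- ===== VERDICT (by name: the statement is the Claim_ definition above) =====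
theorem derive_questions_py_spec : Claim_equal_derive_questions_py := by
  intro cf _
  unfold Spec_derive_questions_py derive_questions_py derive_questions_py_alt
  rw [fold_flags_eq]
  simp only [Bool.false_or, List.any_cons, List.any_nil, Bool.or_false]
  cases cf.any (fun f => PySem.Str.isIn "worker" (PySem.Str.lower f) || (PySem.Str.isIn "queue" (PySem.Str.lower f) || PySem.Str.isIn "review" (PySem.Str.lower f))) <;>
    cases cf.any (fun f => PySem.Str.isIn "migration" (PySem.Str.lower f) || (PySem.Str.isIn ".sql" (PySem.Str.lower f) || PySem.Str.isIn "database" (PySem.Str.lower f))) <;>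
    cases cf.any (fun f => PySem.Str.isIn "config" (PySem.Str.lower f) || (PySem.Str.isIn ".env" (PySem.Str.lower f) || PySem.Str.isIn "docker" (PySem.Str.lower f))) <;>
    simp [PySem.List.slice]
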